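-- pv_equiv track=rewrite | github.com/SadriddinDev/BinarySearch | Problems/Easy/510.py | solve
-- ===== SOURCE A (Python) =====
-- def solve(nums):
--     if len(nums) < 2:
--         return 0
--     c = 0
--
--     for i in range(1, len(nums)-1):
--         if not (nums[i-1] >= nums[i] >= nums[i+1]) and not (nums[i-1] <= nums[i] <= nums[i+1]):
--             c += 1
--     return c
-- ===== SOURCE B (Python) =====
-- def solve(nums):
--     if len(nums) < 2:
--         return 0
--     dirs = [(b > a) - (b < a) for a, b in zip(nums, nums[1:])]
--     return sum(1 for d1, d2 in zip(dirs, dirs[1:]) if d1 * d2 < 0)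
-- ===== Notes on version B (the rewrite author's own statement) =====
-- stated objective: alternative
-- what changed: Replaces A's inline three-way monotonicity test over indices by first materialising a direction array of comparison-derived signs (+1/0/-1) for each adjacent pair and then counting adjacent direction pairs of opposite sign.
import Mathlib
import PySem

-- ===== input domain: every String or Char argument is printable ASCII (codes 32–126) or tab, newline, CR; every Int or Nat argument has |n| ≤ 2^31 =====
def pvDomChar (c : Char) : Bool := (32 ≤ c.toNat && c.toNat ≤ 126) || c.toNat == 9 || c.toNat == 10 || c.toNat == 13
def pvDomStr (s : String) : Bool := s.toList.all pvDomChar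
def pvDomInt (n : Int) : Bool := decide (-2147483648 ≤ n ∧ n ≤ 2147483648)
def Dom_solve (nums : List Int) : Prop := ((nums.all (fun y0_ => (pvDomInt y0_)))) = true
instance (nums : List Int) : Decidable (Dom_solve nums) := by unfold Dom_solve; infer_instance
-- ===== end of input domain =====

-- B replaces A's inline triple-monotonicity test by a precomputed ±1/0 direction
-- array and counts adjacent opposite-sign pairs (objective: alternative decomposition, same cost).

-- ===== PORT A =====
def solve (nums : List Int) : Int :=
  if (nums.length : Int) < 2 then 0
  else
    (PySem.List.pyRange 1 ((nums.length : Int) - 1) 1).foldl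
      (fun c i =>
        if ¬(PySem.List.pyGetD nums (i - 1) 0 ≥ PySem.List.pyGetD nums i 0 ∧
              PySem.List.pyGetD nums i 0 ≥ PySem.List.pyGetD nums (i + 1) 0) ∧
           ¬(PySem.List.pyGetD nums (i - 1) 0 ≤ PySem.List.pyGetD nums i 0 ∧
              PySem.List.pyGetD nums i 0 ≤ PySem.List.pyGetD nums (i + 1) 0)
        then c + 1 else c) 0

-- ===== PORT B =====
-- (b > a) - (b < a) : the comparison-only sign of the step a → b
def pvDir (a b : Int) : Int := (if b > a then 1 else 0) - (if b < a then 1 else 0)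

def solve_alt (nums : List Int) : Int :=
  if (nums.length : Int) < 2 then 0
  else
    let dirs := (nums.zip nums.tail).map (fun p => pvDir p.1 p.2)
    ((dirs.zip dirs.tail).countP (fun p => decide (p.1 * p.2 < 0)) : Int)

-- ===== PRECONDITION & SPEC =====
def Spec_solve (nums : List Int) (out : Int) : Prop := out = solve_alt nums
instance (nums : List Int) (out : Int) : Decidable (Spec_solve nums out) := by unfold Spec_solve; infer_instance

-- ===== CLAIM (what is proved, stated in full; the proofs are below) =====
def Claim_equal_solve : Prop := ∀ (nums : List Int), Dom_solve nums → Spec_solve nums (solve nums)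

-- ===== LEMMAS AND PROOFS =====

-- the Boolean triple test A's loop performs at index i
def pvP (nums : List Int) (i : Int) : Bool :=
  decide (¬(PySem.List.pyGetD nums (i - 1) 0 ≥ PySem.List.pyGetD nums i 0 ∧
            PySem.List.pyGetD nums i 0 ≥ PySem.List.pyGetD nums (i + 1) 0) ∧
          ¬(PySem.List.pyGetD nums (i - 1) 0 ≤ PySem.List.pyGetD nums i 0 ∧
            PySem.List.pyGetD nums i 0 ≤ PySem.List.pyGetD nums (i + 1) 0))

lemma pvP_iff_dir (a b c : Int) :
    pvP [a, b, c] 1 = decide (pvDir a b * pvDir b c < 0) := by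
  unfold pvP pvDir
  norm_num [PySem.List.pyGetD]
  rcases lt_trichotomy a b with h | h | h <;> rcases lt_trichotomy b c with h' | h' | h' <;>
    split_ifs <;> simp_all <;> omega

lemma countP_pyRange_shift (a b : Int) (p : Int → Bool) :
    (PySem.List.pyRange (a + 1) (b + 1) 1).countP p
      = (PySem.List.pyRange a b 1).countP (fun i => p (i + 1)) := by
  rw [PySem.List.pyRange_one, PySem.List.pyRange_one]
  have : (b + 1 - (a + 1)) = b - a := by ring
  rw [this, List.countP_map, List.countP_map]
  apply List.countP_congr
  intro k _
  simp [Function.comp]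
  ring_nf

-- A's count, expressed recursively on the list
def pvCntA (nums : List Int) : Nat :=
  (PySem.List.pyRange 1 ((nums.length : Int) - 1) 1).countP (pvP nums)

lemma pvP_cons (x : Int) (t : List Int) (i : Int) (hi : 1 ≤ i) :
    pvP (x :: t) (i + 1) = pvP t i := by
  have h1 : (i + 1 - 1) = i := by ring
  unfold pvP
  rw [h1]
  have g : ∀ j : Int, 0 ≤ j → PySem.List.pyGetD (x :: t) (j + 1) 0 = PySem.List.pyGetD t j 0 := by
    intro j hj
    obtain ⟨n, rfl⟩ := Int.eq_ofNat_of_zero_le hj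
    have : ((n : Int) + 1) = ((n + 1 : Nat) : Int) := by push_cast; ring
    rw [this, PySem.List.pyGetD_natCast, PySem.List.pyGetD_natCast]
    simp
  have e1 := g (i - 1) (by omega)
  have e2 := g i (by omega)
  have e3 := g (i + 1) (by omega)
  rw [show i - 1 + 1 = i by ring] at e1
  rw [e2, e3, ← e1]

lemma pvCntA_cons3 (a b c : Int) (v : List Int) :
    pvCntA (a :: b :: c :: v) = pvCntA (b :: c :: v) + (if pvP [a, b, c] 1 then 1 else 0) := by
  unfold pvCntA
  have hlen : ((a :: b :: c :: v).length : Int) - 1 = (v.length : Int) + 2 := by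
    simp; ring
  rw [hlen]
  have h12 : (1 : Int) ≤ 2 := by omega
  have h2 : (2 : Int) ≤ (v.length : Int) + 2 := by omega
  rw [PySem.List.pyRange_one_append 1 2 ((v.length : Int) + 2) h12 h2,
      List.countP_append]
  have hhead : (PySem.List.pyRange 1 2 1).countP (pvP (a :: b :: c :: v))
      = (if pvP [a, b, c] 1 then 1 else 0) := by
    rw [show (2:Int) = 1 + 1 by norm_num, PySem.List.pyRange_one_singleton]
    have : pvP (a :: b :: c :: v) 1 = pvP [a, b, c] 1 := by
      unfold pvP; simp [pysem]
    simp [List.countP_cons, this]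
  have htail : (PySem.List.pyRange 2 ((v.length : Int) + 2) 1).countP (pvP (a :: b :: c :: v))
      = (PySem.List.pyRange 1 ((v.length : Int) + 1) 1).countP (pvP (b :: c :: v)) := by
    rw [show ((v.length : Int) + 2) = ((v.length : Int) + 1) + 1 by ring,
        show (2:Int) = 1 + 1 by norm_num, countP_pyRange_shift]
    apply List.countP_congr
    intro i hi
    rw [PySem.List.mem_pyRange_one] at hi
    rw [pvP_cons a (b :: c :: v) i hi.1]
  rw [hhead, htail]
  have hlen2 : ((b :: c :: v).length : Int) - 1 = (v.length : Int) + 1 := by simp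
  rw [hlen2]
  exact Nat.add_comm _ _

-- B's count, expressed recursively on the list
def pvCntB (nums : List Int) : Nat :=
  (((nums.zip nums.tail).map (fun p => pvDir p.1 p.2)).zip
    ((nums.zip nums.tail).map (fun p => pvDir p.1 p.2)).tail).countP
      (fun p => decide (p.1 * p.2 < 0))

lemma pvCntB_cons3 (a b c : Int) (v : List Int) :
    pvCntB (a :: b :: c :: v) = pvCntB (b :: c :: v) + (if pvDir a b * pvDir b c < 0 then 1 else 0) := by
  unfold pvCntB
  simp [List.countP_cons]

lemma pvCnt_eq : ∀ (nums : List Int), pvCntA nums = pvCntB nums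
  | [] => by decide
  | [a] => by simp [pvCntA, pvCntB]
  | [a, b] => by simp [pvCntA, pvCntB]
  | a :: b :: c :: v => by
      rw [pvCntA_cons3, pvCntB_cons3, pvCnt_eq (b :: c :: v), pvP_iff_dir]
      simp

lemma solve_eq_cntA (nums : List Int) (h : ¬ (nums.length : Int) < 2) :
    solve nums = (pvCntA nums : Int) := by
  unfold solve pvCntA
  rw [if_neg h]
  rw [PySem.List.foldl_ite_add_one]
  simp only [zero_add]
  rfl

theorem pv_main (nums : List Int) : solve nums = solve_alt nums := by
  by_cases h : (nums.length : Int) < 2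
  · unfold solve solve_alt
    rw [if_pos h, if_pos h]
  · rw [solve_eq_cntA nums h]
    unfold solve_alt
    rw [if_neg h]
    simp only [pvCnt_eq, pvCntB]

-- ===== VERDICT (by name: the statement is the Claim_ definition above) =====
theorem solve_spec : Claim_equal_solve := by
  intro nums _
  unfold Spec_solve
  exact pv_main nums
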